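-- pv_equiv track=rewrite | github.com/Arban19/Codewars | break_camelCase.py | solution
-- ===== SOURCE A (Python) =====
-- def solution(sentence):
--     i = 0
--     words = []
--     for j_char in enumerate(sentence):
--         char = j_char[1]
--         if char.isupper():
--             j = j_char[0]
--             words.append(sentence[i:j])
--             i = j
--     words.append(sentence[i:])
--     result = " ".join(words).strip()
--     return result
-- ===== SOURCE B (Python) =====
-- def solution(sentence):
--     out = []
--     for ch in sentence:
--         if ch.isupper():
--             out.append(' ')
--         out.append(ch)
--     return ''.join(out).strip()
-- ===== Notes on version B (the rewrite author's own statement) =====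
-- stated objective: idiomatic
-- what changed: Replaced A's boundary-index tracking with substring slicing and a final join over collected words by a single per-character pass that injects a space before each uppercase character and joins once.
import Mathlib
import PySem

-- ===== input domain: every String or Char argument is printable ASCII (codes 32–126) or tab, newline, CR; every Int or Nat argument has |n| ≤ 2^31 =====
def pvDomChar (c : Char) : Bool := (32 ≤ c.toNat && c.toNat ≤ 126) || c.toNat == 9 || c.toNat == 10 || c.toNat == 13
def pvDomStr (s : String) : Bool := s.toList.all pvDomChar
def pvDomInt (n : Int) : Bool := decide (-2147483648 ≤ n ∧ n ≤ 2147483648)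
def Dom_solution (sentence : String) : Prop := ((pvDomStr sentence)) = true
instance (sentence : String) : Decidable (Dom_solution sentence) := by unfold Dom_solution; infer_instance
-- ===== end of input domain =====

-- B replaces A's boundary-index tracking + slicing + word join by a single pass injecting
-- a space before each uppercase character (objective: more idiomatic; same cost).

-- ===== PORT A =====
-- A's loop over enumerate(sentence): state (i, words); at each uppercase char append sentence[i:j], i := j.
def solutionStep (s : List Char) (st : Int × List (List Char)) (jc : Int × Char) : Int × List (List Char) :=
  if PySem.Chars.isupper jc.2 then
    (jc.1, st.2 ++ [PySem.List.slice s (some st.1) (some jc.1)])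
  else st

def solution (sentence : String) : String :=
  let s := sentence.toList
  let st := (PySem.List.enumerate s 0).foldl (solutionStep s) ((0 : Int), ([] : List (List Char)))
  let words := st.2 ++ [PySem.List.slice s (some st.1) none]
  String.ofList (PySem.Chars.strip (PySem.Chars.join [' '] words))

-- ===== PORT B =====
def solution_alt (sentence : String) : String :=
  String.ofList (PySem.Chars.strip
    (sentence.toList.foldl
      (fun acc c => acc ++ ((if PySem.Chars.isupper c then [' '] else []) ++ [c])) []))

-- ===== PRECONDITION & SPEC =====
def Spec_solution (sentence : String) (out : String) : Prop := out = solution_alt sentence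
instance (sentence : String) (out : String) : Decidable (Spec_solution sentence out) := by unfold Spec_solution; infer_instance

-- ===== CLAIM (what is proved, stated in full; the proofs are below) =====
def Claim_equal_solution : Prop := ∀ (sentence : String), Dom_solution sentence → Spec_solution sentence (solution sentence)

-- ===== LEMMAS AND PROOFS =====

-- the space-injection applied per character by B
def pvInject (c : Char) : List Char := (if PySem.Chars.isupper c then [' '] else []) ++ [c]

-- appending text to the last word passes through the join
lemma join_snoc_append (ws : List (List Char)) (t r : List Char) :
    PySem.Chars.join [' '] (ws ++ [t ++ r]) = PySem.Chars.join [' '] (ws ++ [t]) ++ r := by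
  induction ws with
  | nil => simp [PySem.Chars.join_singleton]
  | cons w ws ih =>
      cases ws with
      | nil => simp [PySem.Chars.join_cons_cons, PySem.Chars.join_singleton]
      | cons w' ws' => simp [PySem.Chars.join_cons_cons] at ih ⊢; simp [ih]

-- a new word after at least one existing word contributes one separator
lemma join_snoc_ne (ws : List (List Char)) (t : List Char) (h : ws ≠ []) :
    PySem.Chars.join [' '] (ws ++ [t]) = PySem.Chars.join [' '] ws ++ ' ' :: t := by
  induction ws with
  | nil => exact absurd rfl h
  | cons w ws ih =>
      cases ws with
      | nil => simp [PySem.Chars.join_cons_cons, PySem.Chars.join_singleton]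
      | cons w' ws' =>
          have ih' := ih (by simp)
          rw [List.cons_append] at ih'
          simp only [List.cons_append, PySem.Chars.join_cons_cons]
          rw [ih']
          simp

-- invariant of A's loop: joining the final words equals the already-scanned text with
-- B's space injection applied to the still-unscanned suffix
lemma loopA_join (s : List Char) :
    ∀ (u : List Char) (k i : Nat) (ws : List (List Char)),
      s.drop k = u → i ≤ k →
      (let st := (PySem.List.enumerate u (k : Int)).foldl (solutionStep s) ((i : Int), ws)
       PySem.Chars.join [' '] (st.2 ++ [PySem.List.slice s (some st.1) none]))
      = PySem.Chars.join [' '] (ws ++ [(s.drop i).take (k - i)]) ++ u.flatMap pvInject := by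
  intro u
  induction u with
  | nil =>
      intro k i ws hdrop hik
      have hk : s.length ≤ k := by
        have := congrArg List.length hdrop
        simp at this
        omega
      simp only [PySem.List.enumerate_nil, List.foldl_nil, List.flatMap_nil, List.append_nil]
      rw [PySem.List.slice_from_natCast]
      congr 2
      rw [List.take_of_length_le (by simp; omega)]
  | cons c u ih =>
      intro k i ws hdrop hik
      have hk : k < s.length := by
        by_contra h
        push Not at h
        rw [List.drop_of_length_le h] at hdrop
        simp at hdrop
      have hcons := List.drop_eq_getElem_cons (l := s) (i := k) hk
      rw [hdrop] at hcons
      injection hcons with hsk' hdrop'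
      have hsk : s[k] = c := hsk'.symm
      have hdrop' : s.drop (k + 1) = u := hdrop'.symm
      have htake : ∀ j : Nat, j ≤ k → (s.drop j).take (k + 1 - j) = (s.drop j).take (k - j) ++ [c] := by
        intro j hj
        have h1 : k + 1 - j = (k - j) + 1 := by omega
        rw [h1, List.take_add_one]
        have h2 : (s.drop j)[k - j]? = some c := by
          rw [List.getElem?_drop]
          have : j + (k - j) = k := by omega
          rw [this, List.getElem?_eq_getElem hk, hsk]
        simp [h2]
      rw [PySem.List.enumerate_cons, List.foldl_cons]
      by_cases hc : PySem.Chars.isupper c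
      · have hstep : solutionStep s ((i : Int), ws) ((k : Int), c)
            = ((k : Int), ws ++ [(s.drop i).take (k - i)]) := by
          simp [solutionStep, hc, PySem.List.slice_natCast]
        rw [hstep]
        have := ih (k + 1) k (ws ++ [(s.drop i).take (k - i)]) hdrop' (by omega)
        push_cast at this ⊢
        rw [this]
        rw [htake k le_rfl, Nat.sub_self, List.take_zero, List.nil_append]
        rw [join_snoc_ne _ [c] (by simp)]
        simp [pvInject, hc]
      · have hstep : solutionStep s ((i : Int), ws) ((k : Int), c) = ((i : Int), ws) := by
          simp [solutionStep, hc]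
        rw [hstep]
        have := ih (k + 1) i ws hdrop' (by omega)
        push_cast at this ⊢
        rw [this, htake i hik, join_snoc_append]
        simp [pvInject, hc]

-- ===== VERDICT (by name: the statement is the Claim_ definition above) =====
theorem solution_spec : Claim_equal_solution := by
  intro sentence _
  have h := loopA_join sentence.toList sentence.toList 0 0 [] (by simp) le_rfl
  simp only [Nat.cast_zero] at h
  simp only [Spec_solution, solution, solution_alt]
  rw [PySem.List.foldl_append_eq_flatMap, h]
  simp only [PySem.Chars.join_singleton, List.nil_append, List.drop_zero]
  rfl
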